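-- pv_equiv track=rewrite | github.com/ryankamiri/yap-for-me | training/dataloader.py | group_consecutive_outgoing
-- ===== SOURCE A (Python) =====
-- from typing import List, Dict, Tuple
--
-- def group_consecutive_outgoing(messages: List[Dict]) -> List[List[int]]:
--     """Group consecutive Outgoing message indices.
--
--     Args:
--         messages: List of message dicts
--
--     Returns:
--         List of groups, each group is a list of message indices
--     """
--     groups = []
--     current_group = []
--
--     for idx, msg in enumerate(messages):
--         if msg['type'] == 'Outgoing':
--             current_group.append(idx)
--         else:
--             if current_group:
--                 groups.append(current_group)
--                 current_group = []
--
--     if current_group: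
--         groups.append(current_group)
--
--     return groups
-- ===== SOURCE B (Python) =====
-- from typing import List, Dict
--
-- def group_consecutive_outgoing(messages: List[Dict]) -> List[List[int]]:
--     """Group consecutive Outgoing message indices by jumping over whole runs."""
--     groups = []
--     n = len(messages)
--     i = 0
--     while i < n:
--         if messages[i]['type'] == 'Outgoing':
--             j = i
--             while j < n and messages[j]['type'] == 'Outgoing':
--                 j += 1
--             groups.append(list(range(i, j)))
--             i = j
--         else:
--             i += 1
--     return groups
-- ===== Notes on version B (the rewrite author's own statement) =====
-- stated objective: alternative
-- what changed: Replaces the accumulator-and-flush fold over every element with run segmentation: an outer index loop that, on meeting an Outgoing message, scans to the end of the run and emits range(i, j) directly, jumping the index past the run.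
import Mathlib
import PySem

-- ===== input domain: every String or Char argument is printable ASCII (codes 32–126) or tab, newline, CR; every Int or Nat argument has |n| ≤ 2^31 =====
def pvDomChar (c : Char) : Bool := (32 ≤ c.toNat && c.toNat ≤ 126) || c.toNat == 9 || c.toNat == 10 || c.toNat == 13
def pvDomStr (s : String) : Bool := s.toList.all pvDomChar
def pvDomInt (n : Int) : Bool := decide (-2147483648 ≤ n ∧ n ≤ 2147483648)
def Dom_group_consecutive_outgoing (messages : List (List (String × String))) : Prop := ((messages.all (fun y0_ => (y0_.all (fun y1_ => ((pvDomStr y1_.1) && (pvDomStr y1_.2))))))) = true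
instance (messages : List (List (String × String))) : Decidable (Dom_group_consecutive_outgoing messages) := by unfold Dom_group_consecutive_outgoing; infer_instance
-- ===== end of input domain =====

-- B groups consecutive Outgoing indices by jumping over whole runs (emitting range(i, j)) instead of
-- A's accumulator-and-flush fold; equal return value on all inputs where every message has a 'type' key.

-- ===== PORT A =====
-- msg['type'] == 'Outgoing'  (assoc list is the Python dict; lookup via PySem.Dict)
def msgIsOutgoing (m : List (String × String)) : Bool :=
  (PySem.Dict.ofList m).get? "type" == some "Outgoing"

def group_consecutive_outgoing (messages : List (List (String × String))) : List (List Int) :=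
  let st := (PySem.List.enumerate messages).foldl
    (fun (st : List (List Int) × List Int) im =>
      if msgIsOutgoing im.2 then (st.1, st.2 ++ [im.1])
      else if !st.2.isEmpty then (st.1 ++ [st.2], ([] : List Int)) else st)
    ([], [])
  if !st.2.isEmpty then st.1 ++ [st.2] else st.1

-- ===== PORT B =====
-- inner while:  j advances while j < n and messages[j] is Outgoing
def bRunEnd (messages : List (List (String × String))) (j : Nat) : Nat :=
  if h : j < messages.length then
    if msgIsOutgoing messages[j] then bRunEnd messages (j + 1) else j
  else j
termination_by messages.length - j

theorem bRunEnd_ge (messages : List (List (String × String))) (j : Nat) :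
    j ≤ bRunEnd messages j := by
  unfold bRunEnd
  split_ifs with h1 h2
  · have := bRunEnd_ge messages (j + 1); omega
  · exact le_refl j
  · exact le_refl j
termination_by messages.length - j

theorem bRunEnd_le (messages : List (List (String × String))) (j : Nat)
    (h : j ≤ messages.length) : bRunEnd messages j ≤ messages.length := by
  unfold bRunEnd
  split_ifs with h1 h2
  · exact bRunEnd_le messages (j + 1) h1
  · exact h
  · exact h
termination_by messages.length - j

theorem bRunEnd_gt (messages : List (List (String × String))) (j : Nat)
    (h : j < messages.length) (ho : msgIsOutgoing messages[j] = true) :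
    j < bRunEnd messages j := by
  rw [bRunEnd]
  simp only [h, ho, dif_pos, if_pos]
  have := bRunEnd_ge messages (j + 1); omega

-- outer while over the index i, jumping past each Outgoing run
def bLoop (messages : List (List (String × String))) (i : Nat) : List (List Int) :=
  if h : i < messages.length then
    if ho : msgIsOutgoing messages[i] then
      PySem.List.pyRange (i : Int) (bRunEnd messages i : Int) 1 :: bLoop messages (bRunEnd messages i)
    else bLoop messages (i + 1)
  else []
termination_by messages.length - i
decreasing_by
  · have h1 := bRunEnd_gt messages i h ho
    have h2 := bRunEnd_le messages i (le_of_lt h)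
    omega
  · omega

def group_consecutive_outgoing_alt (messages : List (List (String × String))) : List (List Int) :=
  bLoop messages 0

-- ===== PRECONDITION & SPEC =====
-- Pre_ excludes exactly the inputs where some message dict lacks the key 'type' (Python A raises KeyError there).
def Pre_group_consecutive_outgoing (messages : List (List (String × String))) : Prop :=
  ∀ m ∈ messages, "type" ∈ m.map Prod.fst
instance (messages : List (List (String × String))) : Decidable (Pre_group_consecutive_outgoing messages) := by unfold Pre_group_consecutive_outgoing; infer_instance

def pvWitness_group_consecutive_outgoing : (List (List (String × String))) :=
  [[("type", "Outgoing")], [("type", "Incoming")], [("type", "Outgoing")], [("type", "Outgoing")]]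

def Spec_group_consecutive_outgoing (messages : List (List (String × String))) (out : List (List Int)) : Prop := out = group_consecutive_outgoing_alt messages
instance (messages : List (List (String × String))) (out : List (List Int)) : Decidable (Spec_group_consecutive_outgoing messages out) := by unfold Spec_group_consecutive_outgoing; infer_instance

-- ===== CLAIM (what is proved, stated in full; the proofs are below) =====
def Claim_equal_group_consecutive_outgoing : Prop := ∀ (messages : List (List (String × String))), Dom_group_consecutive_outgoing messages → Pre_group_consecutive_outgoing messages → Spec_group_consecutive_outgoing messages (group_consecutive_outgoing messages)

-- ===== LEMMAS AND PROOFS =====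

-- common reference recursion: pending run c, remaining enumerated messages
def specF : List (Int × List (String × String)) → List Int → List (List Int)
  | [], c => if c.isEmpty then [] else [c]
  | (i, m) :: rest, c =>
      if msgIsOutgoing m then specF rest (c ++ [i])
      else (if c.isEmpty then [] else [c]) ++ specF rest []

-- A's fold equals specF
theorem aFold_eq (xs : List (Int × List (String × String))) :
    ∀ (g : List (List Int)) (c : List Int),
      (let st := xs.foldl
        (fun (st : List (List Int) × List Int) im =>
          if msgIsOutgoing im.2 then (st.1, st.2 ++ [im.1])
          else if !st.2.isEmpty then (st.1 ++ [st.2], ([] : List Int)) else st)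
        (g, c);
       if !st.2.isEmpty then st.1 ++ [st.2] else st.1) = g ++ specF xs c := by
  induction xs with
  | nil =>
      intro g c
      simp only [List.foldl_nil, specF]
      by_cases hc : c.isEmpty <;> simp [hc]
  | cons p rest ih =>
      intro g c
      obtain ⟨i, m⟩ := p
      simp only [List.foldl_cons, specF]
      by_cases hm : msgIsOutgoing m
      · simpa [hm] using ih g (c ++ [i])
      · by_cases hc : c.isEmpty
        · have hc' : c = [] := List.isEmpty_iff.mp hc
          simpa [hm, hc'] using ih g []
        · simp only [hm, hc, Bool.false_eq_true, if_false, Bool.not_false, if_true]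
          rw [ih (g ++ [c]) []]
          simp

theorem a_eq_specF (messages : List (List (String × String))) :
    group_consecutive_outgoing messages = specF (PySem.List.enumerate messages) [] := by
  have h := aFold_eq (PySem.List.enumerate messages) [] []
  simpa [group_consecutive_outgoing] using h

-- the run lemma: specF over a run of Outgoing messages collects pyRange j (bRunEnd j) 1
theorem specF_run (messages : List (List (String × String))) (j : Nat)
    (hj : j ≤ messages.length) (c : List Int) (hc : ¬ c.isEmpty) :
    specF (PySem.List.enumerate (messages.drop j) (j : Int)) c
      = (c ++ PySem.List.pyRange (j : Int) (bRunEnd messages j : Int) 1)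
        :: specF (PySem.List.enumerate (messages.drop (bRunEnd messages j)) ((bRunEnd messages j : Nat) : Int)) [] := by
  by_cases h : j < messages.length
  · have hdrop : messages.drop j = messages[j] :: messages.drop (j + 1) :=
      List.drop_eq_getElem_cons h
    by_cases hm : msgIsOutgoing messages[j]
    · have hre : bRunEnd messages j = bRunEnd messages (j + 1) := by
        rw [bRunEnd]; simp [h, hm]
      have hgt : j < bRunEnd messages (j + 1) := by
        have := bRunEnd_gt messages j h hm; omega
      have ih := specF_run messages (j + 1) h (c ++ [(j : Int)]) (by simp)
      rw [hdrop, PySem.List.enumerate_cons, specF, if_pos hm]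
      have hcast : ((j : Int) + 1) = ((j + 1 : Nat) : Int) := by push_cast; ring
      rw [hcast, ih, hre]
      have hrange : PySem.List.pyRange (j : Int) (bRunEnd messages (j + 1) : Int) 1
          = (j : Int) :: PySem.List.pyRange ((j : Int) + 1) (bRunEnd messages (j + 1) : Int) 1 :=
        PySem.List.pyRange_one_cons (by exact_mod_cast hgt)
      rw [hrange, hcast]
      simp [List.append_assoc]
    · have hre : bRunEnd messages j = j := by
        rw [bRunEnd]; simp [h, hm]
      rw [hre]
      have hnil : PySem.List.pyRange (j : Int) (j : Int) 1 = [] :=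
        PySem.List.pyRange_one_eq_nil (le_refl _)
      rw [hdrop, PySem.List.enumerate_cons, specF, if_neg hm, specF, if_neg hm]
      simp [hc, hnil]
  · have hjn : j = messages.length := by omega
    have hre : bRunEnd messages j = j := by rw [bRunEnd]; simp [h]
    have hnil : messages.drop j = [] := List.drop_eq_nil_of_le (by omega)
    rw [hre, hnil]
    simp [PySem.List.enumerate_nil, specF, hc, PySem.List.pyRange_one_eq_nil (le_refl (j : Int))]
termination_by messages.length - j

theorem bLoop_eq_specF (messages : List (List (String × String))) (j : Nat)
    (hj : j ≤ messages.length) :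
    bLoop messages j = specF (PySem.List.enumerate (messages.drop j) (j : Int)) [] := by
  by_cases h : j < messages.length
  · have hdrop : messages.drop j = messages[j] :: messages.drop (j + 1) :=
      List.drop_eq_getElem_cons h
    by_cases hm : msgIsOutgoing messages[j]
    · have hre : bRunEnd messages j = bRunEnd messages (j + 1) := by
        rw [bRunEnd]; simp [h, hm]
      have hgt : j < bRunEnd messages (j + 1) := by
        have := bRunEnd_gt messages j h hm; omega
      have hle : bRunEnd messages (j + 1) ≤ messages.length := bRunEnd_le messages (j + 1) h
      have ih := bLoop_eq_specF messages (bRunEnd messages (j + 1)) hle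
      have hrun := specF_run messages (j + 1) h [(j : Int)] (by simp)
      rw [bLoop]
      simp only [h, hm, dif_pos, dif_pos]
      rw [hre, ih, hdrop, PySem.List.enumerate_cons, specF, if_pos hm]
      have hcast : ((j : Int) + 1) = ((j + 1 : Nat) : Int) := by push_cast; ring
      rw [List.nil_append, hcast, hrun]
      have hrange : PySem.List.pyRange (j : Int) (bRunEnd messages (j + 1) : Int) 1
          = (j : Int) :: PySem.List.pyRange ((j : Int) + 1) (bRunEnd messages (j + 1) : Int) 1 :=
        PySem.List.pyRange_one_cons (by exact_mod_cast hgt)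
      rw [hrange, hcast]
      simp
    · have ih := bLoop_eq_specF messages (j + 1) h
      rw [bLoop]
      simp only [h, dif_pos]
      rw [dif_neg (by simp [hm]), ih, hdrop, PySem.List.enumerate_cons, specF, if_neg hm]
      have hcast : ((j : Int) + 1) = ((j + 1 : Nat) : Int) := by push_cast; ring
      rw [hcast]
      simp
  · have hnil : messages.drop j = [] := List.drop_eq_nil_of_le (by omega)
    rw [bLoop]
    simp [h, hnil, PySem.List.enumerate_nil, specF]
termination_by messages.length - j

-- ===== VERDICT (by name: the statement is the Claim_ definition above) =====
theorem group_consecutive_outgoing_spec : Claim_equal_group_consecutive_outgoing := by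
  intro messages _ _
  unfold Spec_group_consecutive_outgoing
  rw [a_eq_specF, group_consecutive_outgoing_alt, bLoop_eq_specF messages 0 (Nat.zero_le _)]
  simp
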